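-- pv_equiv track=rewrite | github.com/Aftab-project/Skin2026 | generate_refactored_facials.py | adjust_paths_for_subdir
-- ===== SOURCE A (Python) =====
-- def adjust_paths_for_subdir(content: str, subdir: str) -> str:
--     """Adjust asset and navigation paths when writing into a subdirectory."""
--     if subdir != 'treatments':
--         return content
--
--     replacements = {
--         'href="index.html': 'href="../index.html',
--         'href="faq.html': 'href="../faq.html',
--         'href="contact.php': 'href="../contact.php',
--         'href="styles.css"': 'href="../styles.css"',
--         'href="components.css"': 'href="../components.css"',
--         'href="script.js"': 'href="../script.js"',
--         'href="hydrofacial.html': 'href="../hydrofacial.html',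
--         'href="korean-facial.html': 'href="../korean-facial.html',
--         'href="oxygeno-facial.html': 'href="../oxygeno-facial.html',
--         'href="biorepeel.html': 'href="../biorepeel.html',
--         'href="biomicroneedling.html': 'href="../biomicroneedling.html',
--         'href="chemical-peel.html': 'href="../chemical-peel.html',
--         'href="microneedling-biorepeel.html': 'href="../microneedling-biorepeel.html',
--         'href="rf-facial.html': 'href="../rf-facial.html',
--         'href="ultimate-exfoliation.html': 'href="../ultimate-exfoliation.html',
--         'href="bb-glow.html': 'href="../bb-glow.html',
--         'href="blackhead-extraction.html': 'href="../blackhead-extraction.html',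
--         'href="treatments/': 'href="../treatments/',
--         'url(\'./images/': "url('../images/",
--         'src="./images/': 'src="../images/',
--     }
--
--     for old, new in replacements.items():
--         content = content.replace(old, new)
--     return content
-- ===== SOURCE B (Python) =====
-- def adjust_paths_for_subdir(content: str, subdir: str) -> str:
--     """Adjust asset and navigation paths when writing into a subdirectory.
--
--     Different structure: the rule table is generated from a short list of bare
--     target names ('href="NAME' -> 'href="../NAME') plus the two image rules,
--     and the rewriting is ONE left-to-right pass that, at each position, emits
--     the replacement of the first matching pattern, instead of twenty
--     sequential full-content replaces.
--     """
--     if subdir != 'treatments':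
--         return content
--
--     targets = [
--         'index.html', 'faq.html', 'contact.php',
--         'styles.css"', 'components.css"', 'script.js"',
--         'hydrofacial.html', 'korean-facial.html', 'oxygeno-facial.html',
--         'biorepeel.html', 'biomicroneedling.html', 'chemical-peel.html',
--         'microneedling-biorepeel.html', 'rf-facial.html',
--         'ultimate-exfoliation.html', 'bb-glow.html',
--         'blackhead-extraction.html', 'treatments/',
--     ]
--     rules = [('href="' + t, 'href="../' + t) for t in targets]
--     rules.append(("url('./images/", "url('../images/"))
--     rules.append(('src="./images/', 'src="../images/'))
--
--     out = []
--     i = 0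
--     n = len(content)
--     while i < n:
--         for old, new in rules:
--             if content.startswith(old, i):
--                 out.append(new)
--                 i += len(old)
--                 break
--         else:
--             out.append(content[i])
--             i += 1
--     return ''.join(out)
-- ===== Notes on version B (the rewrite author's own statement) =====
-- stated objective: alternative
-- what changed: Replaces the twenty sequential full-content str.replace passes by a rule table generated from a short list of bare target names plus one left-to-right scan that at each position emits the replacement of the first matching pattern (equal because the concrete patterns cannot overlap and the inserted '../' creates no new matches).
import Mathlib
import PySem

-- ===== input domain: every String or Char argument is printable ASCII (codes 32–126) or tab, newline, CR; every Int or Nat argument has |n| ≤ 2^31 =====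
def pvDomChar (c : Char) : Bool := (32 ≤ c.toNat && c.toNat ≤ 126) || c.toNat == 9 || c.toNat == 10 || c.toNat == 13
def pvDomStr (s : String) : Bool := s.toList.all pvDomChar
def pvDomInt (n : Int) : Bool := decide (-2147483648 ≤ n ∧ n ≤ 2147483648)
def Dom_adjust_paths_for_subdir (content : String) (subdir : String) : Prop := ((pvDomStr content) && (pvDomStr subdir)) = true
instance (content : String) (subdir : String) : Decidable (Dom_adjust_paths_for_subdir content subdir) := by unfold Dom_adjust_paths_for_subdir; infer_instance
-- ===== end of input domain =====

-- B generates the rule table from a short list of bare target names and rewrites in ONE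
-- left-to-right pass applying the first matching pattern, instead of A's 20 sequential
-- full-content replaces (alternative decomposition; proved equal because the concrete
-- patterns cannot overlap or create new matches).

-- ===== PORT A =====
-- the dict literal of A, as an association list in insertion order
def pvPairsA : List (String × String) :=
  [("href=\"index.html", "href=\"../index.html"),
   ("href=\"faq.html", "href=\"../faq.html"),
   ("href=\"contact.php", "href=\"../contact.php"),
   ("href=\"styles.css\"", "href=\"../styles.css\""),
   ("href=\"components.css\"", "href=\"../components.css\""),
   ("href=\"script.js\"", "href=\"../script.js\""),
   ("href=\"hydrofacial.html", "href=\"../hydrofacial.html"),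
   ("href=\"korean-facial.html", "href=\"../korean-facial.html"),
   ("href=\"oxygeno-facial.html", "href=\"../oxygeno-facial.html"),
   ("href=\"biorepeel.html", "href=\"../biorepeel.html"),
   ("href=\"biomicroneedling.html", "href=\"../biomicroneedling.html"),
   ("href=\"chemical-peel.html", "href=\"../chemical-peel.html"),
   ("href=\"microneedling-biorepeel.html", "href=\"../microneedling-biorepeel.html"),
   ("href=\"rf-facial.html", "href=\"../rf-facial.html"),
   ("href=\"ultimate-exfoliation.html", "href=\"../ultimate-exfoliation.html"),
   ("href=\"bb-glow.html", "href=\"../bb-glow.html"),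
   ("href=\"blackhead-extraction.html", "href=\"../blackhead-extraction.html"),
   ("href=\"treatments/", "href=\"../treatments/"),
   ("url('./images/", "url('../images/"),
   ("src=\"./images/", "src=\"../images/")]

-- A: guard, then one full-content replace per table entry, in table order
def adjust_paths_for_subdir (content : String) (subdir : String) : String :=
  if subdir ≠ "treatments" then content
  else pvPairsA.foldl (fun c p => PySem.Str.replace c p.1 p.2) content

-- ===== PORT B =====
-- Source B's short list of bare target names
def pvTargetsB : List String :=
  ["index.html", "faq.html", "contact.php",
   "styles.css\"", "components.css\"", "script.js\"",
   "hydrofacial.html", "korean-facial.html", "oxygeno-facial.html",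
   "biorepeel.html", "biomicroneedling.html", "chemical-peel.html",
   "microneedling-biorepeel.html", "rf-facial.html",
   "ultimate-exfoliation.html", "bb-glow.html",
   "blackhead-extraction.html", "treatments/"]

-- Source B: rules built by comprehension over the targets, plus the two image rules
def pvRulesB : List (String × String) :=
  pvTargetsB.map (fun t => ("href=\"" ++ t, "href=\"../" ++ t)) ++
  [("url('./images/", "url('../images/"), ("src=\"./images/", "src=\"../images/")]

-- hand-port of Source B's single pass (PySem has no multi-pattern primitive): at each position,
-- the first rule whose pattern is a prefix is replaced and skipped, otherwise the character
-- is copied; exact for Source B's while loop (all patterns are nonempty, so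
-- `drop (k.length - 1) t` is Python's `i += len(old)`)
def pvScan (ps : List (List Char × List Char)) : List Char → List Char
  | [] => []
  | c :: t =>
    match ps.find? (fun p => p.1.isPrefixOf (c :: t)) with
    | some (k, v) => v ++ pvScan ps (List.drop (k.length - 1) t)
    | none => c :: pvScan ps t
termination_by l => l.length
decreasing_by
  · simp [Nat.sub_le]
  · simp

def adjust_paths_for_subdir_alt (content : String) (subdir : String) : String :=
  if subdir ≠ "treatments" then content
  else String.ofList
    (pvScan (pvRulesB.map (fun p => (p.1.toList, p.2.toList))) content.toList)

-- ===== PRECONDITION & SPEC =====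
def Spec_adjust_paths_for_subdir (content : String) (subdir : String) (out : String) : Prop := out = adjust_paths_for_subdir_alt content subdir
instance (content : String) (subdir : String) (out : String) : Decidable (Spec_adjust_paths_for_subdir content subdir out) := by unfold Spec_adjust_paths_for_subdir; infer_instance

-- ===== CLAIM (what is proved, stated in full; the proofs are below) =====
def Claim_equal_adjust_paths_for_subdir : Prop := ∀ (content : String) (subdir : String), Dom_adjust_paths_for_subdir content subdir → Spec_adjust_paths_for_subdir content subdir (adjust_paths_for_subdir content subdir)

-- ===== LEMMAS AND PROOFS =====

-- A's `str.replace` (PySem.Chars.replace), re-stated as structural recursion without fuel/accumulator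
def pvREP (old new : List Char) : List Char → List Char
  | [] => []
  | c :: t =>
    if old.isPrefixOf (c :: t) && !old.isEmpty then
      new ++ pvREP old new (List.drop (old.length - 1) t)
    else c :: pvREP old new t
termination_by l => l.length
decreasing_by
  · simp [Nat.sub_le]
  · simp

-- side conditions on the concrete table under which one simultaneous pass equals the
-- sequential replaces: pattern a cannot match starting (strictly) inside b, for any continuation
def pvCantHit (a b : List Char) (j : Nat) : Bool :=
  !(List.isPrefixOf a (b.drop j)) && !(List.isPrefixOf (b.drop j) a)
def pvInside1 (a b : List Char) : Bool :=
  (List.range b.length).all fun j => j == 0 || pvCantHit a b j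
def pvAllPos (a b : List Char) : Bool :=
  (List.range b.length).all fun j => pvCantHit a b j
def pvGoodPair (k v : List Char) (p : List Char × List Char) : Bool :=
  !(List.isPrefixOf k p.1) && !(List.isPrefixOf p.1 k) &&
  pvInside1 k p.1 && pvAllPos p.1 v && pvInside1 v p.1
def pvGood : List (List Char × List Char) → Bool
  | [] => true
  | (k, v) :: rest => !k.isEmpty && rest.all (pvGoodPair k v) && pvGood rest

theorem pv_pfx_cases {k a x : List Char} (h : k <+: a ++ x) : k <+: a ∨ a <+: k :=
  List.prefix_or_prefix_of_prefix h (List.prefix_append a x)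

theorem pv_cantHit_spec {a b : List Char} {j : Nat} (h : pvCantHit a b j = true)
    (x : List Char) : ¬ a <+: (b.drop j ++ x) := by
  intro hp
  simp only [pvCantHit, Bool.and_eq_true, Bool.not_eq_true'] at h
  rcases pv_pfx_cases hp with h1 | h1
  · rw [← List.isPrefixOf_iff_prefix] at h1; simp [h.1] at h1
  · rw [← List.isPrefixOf_iff_prefix] at h1; simp [h.2] at h1

theorem pv_good_keys_ne {ps : List (List Char × List Char)} (hg : pvGood ps = true) :
    ∀ p ∈ ps, p.1 ≠ [] := by
  induction ps with
  | nil => simp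
  | cons q rest ih =>
    obtain ⟨k, v⟩ := q
    simp only [pvGood, Bool.and_eq_true] at hg
    intro p hp
    rcases List.mem_cons.mp hp with h | h
    · subst h; simpa [List.isEmpty_iff] using hg.1.1
    · exact ih hg.2 p h

theorem pv_good_tail {k v : List Char} {rest : List (List Char × List Char)}
    (hg : pvGood ((k, v) :: rest) = true) : pvGood rest = true := by
  simp only [pvGood, Bool.and_eq_true] at hg; exact hg.2

theorem pv_scan_nil : ∀ l, pvScan [] l = l := by
  intro l
  induction l with
  | nil => simp [pvScan]
  | cons c t ih => rw [pvScan]; simp [ih]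

theorem pv_go_eq (old new : List Char) (hold : old ≠ []) :
    ∀ fuel l acc, l.length ≤ fuel →
      PySem.Chars.replace.go old new fuel l acc = acc.reverse ++ pvREP old new l := by
  intro fuel
  induction fuel with
  | zero =>
    intro l acc h
    have : l = [] := List.eq_nil_of_length_eq_zero (Nat.le_zero.mp h)
    subst this
    simp [PySem.Chars.replace.go, pvREP]
  | succ f ih =>
    intro l acc h
    match l with
    | [] => simp [PySem.Chars.replace.go, pvREP]
    | c :: t =>
      rw [PySem.Chars.replace.go]
      by_cases hp : old.isPrefixOf (c :: t)
      · have hlen : old.length ≥ 1 := by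
          cases old with | nil => exact absurd rfl hold | cons a b => simp
        have hdrop : List.drop old.length (c :: t) = List.drop (old.length - 1) t := by
          cases old with | nil => exact absurd rfl hold | cons a b => simp
        rw [if_pos hp, hdrop, ih _ _ (by
          have := List.length_drop (l := t) (i := old.length - 1)
          simp at h ⊢
          omega)]
        simp [pvREP, hp, hold, List.isEmpty_iff]
      · rw [if_neg hp, ih _ _ (by simp at h ⊢; omega)]
        simp [pvREP, hp]

theorem pv_replace_eq (old new s : List Char) (hold : old ≠ []) :
    PySem.Chars.replace s old new = pvREP old new s := by
  rw [PySem.Chars.replace, if_neg (by simpa [List.isEmpty_iff] using hold)]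
  simpa using pv_go_eq old new hold s.length s [] le_rfl

-- copy lemma for pvREP
theorem pv_rep_copy (k v : List Char) :
    ∀ (u x : List Char), (∀ j, j < u.length → ¬ k <+: (u.drop j ++ x)) →
      pvREP k v (u ++ x) = u ++ pvREP k v x := by
  intro u
  induction u with
  | nil => intro x _; simp
  | cons a u' ih =>
    intro x h
    rw [List.cons_append, pvREP]
    have h0 : ¬ k <+: (a :: (u' ++ x)) := by
      have := h 0 (by simp)
      simpa using this
    rw [if_neg (by simp only [Bool.and_eq_true, Bool.not_eq_true']
                   intro hc
                   exact h0 ((List.isPrefixOf_iff_prefix).mp hc.1))]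
    rw [ih x (fun j hj => by simpa using h (j + 1) (by simpa using hj))]; simp

-- copy lemma for pvScan
theorem pv_scan_copy (ps : List (List Char × List Char)) :
    ∀ (u x : List Char), (∀ j, j < u.length → ∀ p ∈ ps, ¬ p.1 <+: (u.drop j ++ x)) →
      pvScan ps (u ++ x) = u ++ pvScan ps x := by
  intro u
  induction u with
  | nil => intro x _; simp
  | cons a u' ih =>
    intro x h
    rw [List.cons_append, pvScan]
    have hnone : ps.find? (fun p => p.1.isPrefixOf (a :: (u' ++ x))) = none := by
      rw [List.find?_eq_none]
      intro p hp
      simp only [Bool.not_eq_true]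
      rw [← Bool.not_eq_true, List.isPrefixOf_iff_prefix]
      simpa using h 0 (by simp) p hp
    rw [hnone]
    rw [ih x (fun j hj p hp => by simpa using h (j + 1) (by simpa using hj) p hp)]; simp

-- inner lemma: a proper tail of k' that is a prefix of pvREP k v t is a prefix of t
theorem pv_tail_lift (k v k' : List Char)
    (hin : ∀ j, 0 < j → j < k'.length → pvCantHit v k' j = true) :
    ∀ (t : List Char) (p : Nat), 0 < p → p < k'.length →
      k'.drop p <+: pvREP k v t → k'.drop p <+: t := by
  intro t
  induction t with
  | nil => intro p _ _ h; simpa [pvREP] using h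
  | cons d t' ih =>
    intro p hp hplen h
    rw [pvREP] at h
    by_cases hm : (k.isPrefixOf (d :: t') && !k.isEmpty) = true
    · rw [if_pos hm] at h
      exfalso
      rcases pv_pfx_cases h with h1 | h1
      · have := hin p hp hplen
        simp only [pvCantHit, Bool.and_eq_true, Bool.not_eq_true'] at this
        rw [← List.isPrefixOf_iff_prefix] at h1; simp [this.2] at h1
      · have := hin p hp hplen
        simp only [pvCantHit, Bool.and_eq_true, Bool.not_eq_true'] at this
        rw [← List.isPrefixOf_iff_prefix] at h1; simp [this.1] at h1
    · rw [if_neg hm] at h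
      have hne : k'.drop p ≠ [] := by
        intro hnil
        have := List.drop_eq_nil_iff.mp hnil
        omega
      obtain ⟨e, q, hq⟩ := List.exists_cons_of_ne_nil hne
      have hq1 : q = k'.drop (p + 1) := by
        have := congrArg (List.drop 1) hq
        simpa [List.drop_drop] using this.symm
      rw [hq] at h
      rcases (List.cons_prefix_cons).mp h with ⟨he, hq2⟩
      subst he
      by_cases hqe : q = []
      · rw [hq, hqe]
        simpa using List.cons_prefix_cons.mpr ⟨rfl, List.nil_prefix⟩
      · have hp1 : p + 1 < k'.length := by
          by_contra hc
          exact hqe (hq1 ▸ List.drop_eq_nil_iff.mpr (by omega))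
        have := ih (p + 1) (by omega) hp1 (hq1 ▸ hq2)
        rw [hq]
        exact List.cons_prefix_cons.mpr ⟨rfl, hq1 ▸ this⟩

theorem pv_nomatch_output (k v k' : List Char) (c : Char) (t : List Char)
    (hin : ∀ j, 0 < j → j < k'.length → pvCantHit v k' j = true)
    (h0 : ¬ k' <+: (c :: t)) :
    ¬ k' <+: (c :: pvREP k v t) := by
  intro h
  cases hk' : k' with
  | nil => exact h0 (by simp [hk'])
  | cons e q =>
    subst hk'
    rcases (List.cons_prefix_cons).mp h with ⟨he, hq⟩
    subst he
    by_cases hqe : q = []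
    · exact h0 (by simp [hqe, List.cons_prefix_cons])
    · have hlen : 1 < (e :: q).length := by
        cases q with | nil => exact absurd rfl hqe | cons _ _ => simp
      have := pv_tail_lift k v (e :: q) (by simpa using hin) t 1 (by omega) hlen (by simpa using hq)
      exact h0 (List.cons_prefix_cons.mpr ⟨rfl, by simpa using this⟩)

theorem pv_inside1_spec {a b : List Char} (h : pvInside1 a b = true) :
    ∀ j, 0 < j → j < b.length → pvCantHit a b j = true := by
  intro j hj hjb
  have := (List.all_eq_true.mp h) j (List.mem_range.mpr hjb)
  simpa [Nat.pos_iff_ne_zero.mp hj] using this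

theorem pv_allpos_spec {a b : List Char} (h : pvAllPos a b = true) :
    ∀ j, j < b.length → pvCantHit a b j = true := by
  intro j hjb
  exact (List.all_eq_true.mp h) j (List.mem_range.mpr hjb)

theorem pv_goodpair_spec {k v : List Char} {p : List Char × List Char}
    (h : pvGoodPair k v p = true) :
    ¬ k <+: p.1 ∧ ¬ p.1 <+: k ∧ pvInside1 k p.1 = true ∧ pvAllPos p.1 v = true ∧
      pvInside1 v p.1 = true := by
  simp only [pvGoodPair, Bool.and_eq_true, Bool.not_eq_true'] at h
  obtain ⟨⟨⟨⟨h1, h2⟩, h3⟩, h4⟩, h5⟩ := h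
  refine ⟨?_, ?_, h3, h4, h5⟩
  · intro hc; rw [← List.isPrefixOf_iff_prefix] at hc; simp [h1] at hc
  · intro hc; rw [← List.isPrefixOf_iff_prefix] at hc; simp [h2] at hc

theorem pv_find_stable {ps : List (List Char × List Char)} (hg : pvGood ps = true)
    {s : List Char} {k' v' : List Char}
    (hf : ps.find? (fun p => p.1.isPrefixOf s) = some (k', v'))
    (hs : k' <+: s) :
    ∀ Y, ps.find? (fun p => p.1.isPrefixOf (k' ++ Y)) = some (k', v') := by
  induction ps with
  | nil => simp at hf
  | cons q rest ih =>
    obtain ⟨k0, v0⟩ := q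
    intro Y
    simp only [pvGood, Bool.and_eq_true] at hg
    by_cases h0 : k0.isPrefixOf s = true
    · rw [List.find?_cons_of_pos (by simpa using h0)] at hf
      obtain ⟨hk, hv⟩ := Prod.mk.injEq .. ▸ (Option.some.injEq .. ▸ hf)
      subst hk; subst hv
      exact List.find?_cons_of_pos (by simp [List.isPrefixOf_iff_prefix])
    · rw [List.find?_cons_of_neg (by simpa using h0)] at hf
      have hmem : (k', v') ∈ rest := List.mem_of_find?_eq_some hf
      have hgp := pv_goodpair_spec ((List.all_eq_true.mp hg.1.2) _ hmem)
      have h0' : ¬ k0.isPrefixOf (k' ++ Y) = true := by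
        intro hc
        rw [List.isPrefixOf_iff_prefix] at hc
        rcases pv_pfx_cases hc with h1 | h1
        · exact h0 (List.isPrefixOf_iff_prefix.mpr (h1.trans hs))
        · exact hgp.2.1 h1
      rw [List.find?_cons_of_neg (by simpa using h0')]
      exact ih hg.2 hf Y

theorem pv_fusion {k v : List Char} {rest : List (List Char × List Char)}
    (hg : pvGood ((k, v) :: rest) = true) :
    ∀ (n : Nat) (s : List Char), s.length ≤ n →
      pvScan rest (pvREP k v s) = pvScan ((k, v) :: rest) s := by
  have hg' := hg
  simp only [pvGood, Bool.and_eq_true] at hg'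
  have hk : k ≠ [] := by simpa [List.isEmpty_iff] using hg'.1.1
  have hall : ∀ p ∈ rest, pvGoodPair k v p = true := List.all_eq_true.mp hg'.1.2
  have hgr : pvGood rest = true := hg'.2
  intro n
  induction n with
  | zero =>
    intro s hs
    have : s = [] := List.eq_nil_of_length_eq_zero (Nat.le_zero.mp hs)
    subst this
    simp [pvREP, pvScan]
  | succ m ih =>
    intro s hs
    match s with
    | [] => simp [pvREP, pvScan]
    | c :: t =>
      by_cases hA : k.isPrefixOf (c :: t) = true
      · have hrep : pvREP k v (c :: t) = v ++ pvREP k v (List.drop (k.length - 1) t) := by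
          rw [pvREP, if_pos (by simp [hA, hk])]
        have hcopy : pvScan rest (v ++ pvREP k v (List.drop (k.length - 1) t)) =
            v ++ pvScan rest (pvREP k v (List.drop (k.length - 1) t)) := by
          apply pv_scan_copy
          intro j hj p hp
          exact pv_cantHit_spec (pv_allpos_spec (pv_goodpair_spec (hall p hp)).2.2.2.1 j hj) _
        have hlen : (List.drop (k.length - 1) t).length ≤ m := by
          have := List.length_drop (l := t) (i := k.length - 1)
          simp at hs; omega
        rw [hrep, hcopy, ih _ hlen, pvScan, List.find?_cons_of_pos (by simpa using hA)]
      · have hrep : pvREP k v (c :: t) = c :: pvREP k v t := by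
          rw [pvREP, if_neg (by simp [hA])]
        cases hr : rest.find? (fun p => p.1.isPrefixOf (c :: t)) with
        | some q =>
          obtain ⟨k', v'⟩ := q
          have hmem : (k', v') ∈ rest := List.mem_of_find?_eq_some hr
          have hgp := pv_goodpair_spec (hall _ hmem)
          have hk'pre : k' <+: c :: t := by
            have := List.find?_some hr
            exact List.isPrefixOf_iff_prefix.mp (by simpa using this)
          have hk'ne : k' ≠ [] := pv_good_keys_ne hgr _ hmem
          obtain ⟨s₂, hsplit⟩ := hk'pre
          have hrep2 : pvREP k v (c :: t) = k' ++ pvREP k v s₂ := by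
            rw [← hsplit]
            apply pv_rep_copy
            intro j hj
            cases j with
            | zero =>
              simp only [List.drop_zero]
              rw [hsplit]
              intro hc
              exact hA (List.isPrefixOf_iff_prefix.mpr hc)
            | succ i =>
              exact pv_cantHit_spec (pv_inside1_spec hgp.2.2.1 _ (Nat.succ_pos i) hj) _
          obtain ⟨e, k'', hk'⟩ := List.exists_cons_of_ne_nil hk'ne
          have he : e = c := by
            rw [hk'] at hsplit
            exact (List.cons.injEq .. ▸ hsplit).1
          subst he; subst hk'
          have hstable := pv_find_stable hgr hr ⟨s₂, hsplit⟩ (pvREP k v s₂)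
          have ht2 : t = k'' ++ s₂ := (List.cons.injEq .. ▸ hsplit).2.symm
          have hlen2 : s₂.length ≤ m := by
            have := congrArg List.length ht2
            simp at this hs; omega
          rw [hrep2, List.cons_append, pvScan]
          rw [show ((e :: k'') ++ pvREP k v s₂ = e :: (k'' ++ pvREP k v s₂)) from rfl] at hstable
          rw [hstable]
          simp only [List.length_cons, Nat.add_sub_cancel, List.drop_left]
          rw [ih _ hlen2, pvScan, List.find?_cons_of_neg (by simpa using hA), hr]
          simp only [List.length_cons, Nat.add_sub_cancel]
          rw [ht2, List.drop_left]
        | none =>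
          have hnone2 : rest.find? (fun p => p.1.isPrefixOf (c :: pvREP k v t)) = none := by
            rw [List.find?_eq_none]
            intro p hp
            simp only [Bool.not_eq_true]
            rw [← Bool.not_eq_true, List.isPrefixOf_iff_prefix]
            apply pv_nomatch_output k v p.1 c t
              (pv_inside1_spec (pv_goodpair_spec (hall p hp)).2.2.2.2)
            have := List.find?_eq_none.mp hr p hp
            simpa [List.isPrefixOf_iff_prefix] using this
          have hlen3 : t.length ≤ m := by simp at hs; omega
          rw [hrep, pvScan, hnone2, ih _ hlen3, pvScan,
            List.find?_cons_of_neg (by simpa using hA), hr]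

theorem pv_master {ps : List (List Char × List Char)} (hg : pvGood ps = true) :
    ∀ s, ps.foldl (fun c p => pvREP p.1 p.2 c) s = pvScan ps s := by
  induction ps with
  | nil => intro s; simp [pv_scan_nil]
  | cons q rest ih =>
    obtain ⟨k, v⟩ := q
    intro s
    rw [List.foldl_cons, ih (pv_good_tail hg), pv_fusion hg s.length s le_rfl]

theorem pv_foldl_replace {ps : List (List Char × List Char)} (h : ∀ p ∈ ps, p.1 ≠ []) :
    ∀ s, ps.foldl (fun c p => PySem.Chars.replace c p.1 p.2) s =
      ps.foldl (fun c p => pvREP p.1 p.2 c) s := by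
  induction ps with
  | nil => intro s; rfl
  | cons q rest ih =>
    intro s
    rw [List.foldl_cons, List.foldl_cons,
      pv_replace_eq _ _ _ (h q (List.mem_cons_self ..)),
      ih (fun p hp => h p (List.mem_cons_of_mem _ hp))]

theorem pv_strfold (l : List (String × String)) :
    ∀ c : String, l.foldl (fun c p => PySem.Str.replace c p.1 p.2) c =
      String.ofList ((l.map (fun p => (p.1.toList, p.2.toList))).foldl
        (fun cs p => PySem.Chars.replace cs p.1 p.2) c.toList) := by
  induction l with
  | nil => intro c; simp
  | cons q rest ih =>
    intro c
    rw [List.foldl_cons, ih, List.map_cons, List.foldl_cons]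
    congr 1
    simp [PySem.Str.replace]

theorem pv_good_rules : pvGood (pvRulesB.map (fun p => (p.1.toList, p.2.toList))) = true := by
  decide

theorem pv_pairs_eq :
    pvPairsA.map (fun p => (p.1.toList, p.2.toList)) =
      pvRulesB.map (fun p => (p.1.toList, p.2.toList)) := by
  decide

-- ===== VERDICT (by name: the statement is the Claim_ definition above) =====
theorem adjust_paths_for_subdir_spec : Claim_equal_adjust_paths_for_subdir := by
  intro content subdir _
  unfold Spec_adjust_paths_for_subdir adjust_paths_for_subdir adjust_paths_for_subdir_alt
  by_cases h : subdir = "treatments"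
  · simp only [h, ne_eq, not_true_eq_false, if_false]
    rw [pv_strfold, pv_pairs_eq,
      pv_foldl_replace (pv_good_keys_ne pv_good_rules),
      pv_master pv_good_rules]
  · simp [h]
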